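-- pv_equiv track=rewrite | github.com/r4victor/bwt_compressor | bwt_compressor.py | compute_sorting_permutation
-- ===== SOURCE A (Python) =====
-- import itertools
--
-- ALPHABET_SIZE = 256
--
-- def compute_sorting_permutation(text):
--     counters = get_chars_counters(text)
--     start_positions = get_chars_start_positions(counters)
--     sorting_permutation = [None] * len(text)
--     for i, c in enumerate(text):
--         sorting_permutation[i] = start_positions[ord(c)]
--         start_positions[ord(c)] += 1
--     return sorting_permutation
--
-- def get_chars_counters(text):
--     counters = [0] * ALPHABET_SIZE
--     for c in text:
--         counters[ord(c)] += 1
--     return counters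
--
-- def get_chars_start_positions(counters):
--     return list(itertools.accumulate([0] + counters))[:-1]
-- ===== SOURCE B (Python) =====
-- def compute_sorting_permutation(text):
--     order = sorted(range(len(text)), key=lambda i: text[i])
--     perm = [None] * len(text)
--     for rank, idx in enumerate(order):
--         perm[idx] = rank
--     return perm
-- ===== Notes on version B (the rewrite author's own statement) =====
-- stated objective: idiomatic
-- what changed: Replaced the counting-sort machinery (256-bucket histogram, prefix sums, scatter with mutable start positions) by a stable argsort of the index range keyed by character, then inverting that order into the permutation.
import Mathlib
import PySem

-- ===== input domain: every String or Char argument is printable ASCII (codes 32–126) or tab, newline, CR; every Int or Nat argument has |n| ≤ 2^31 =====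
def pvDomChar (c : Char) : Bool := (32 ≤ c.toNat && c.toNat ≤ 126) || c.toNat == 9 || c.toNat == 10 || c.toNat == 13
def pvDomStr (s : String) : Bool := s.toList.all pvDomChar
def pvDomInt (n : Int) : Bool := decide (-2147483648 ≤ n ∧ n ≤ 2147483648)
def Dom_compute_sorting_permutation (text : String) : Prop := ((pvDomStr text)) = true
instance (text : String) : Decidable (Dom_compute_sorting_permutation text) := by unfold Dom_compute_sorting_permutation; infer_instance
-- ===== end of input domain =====

-- B replaces A's counting-sort machinery (histogram + prefix sums + scatter) by a stable
-- argsort of the index range keyed by character, inverted into the permutation (comparable cost).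

-- ===== PORT A =====
-- itertools.accumulate on a list of ints (running sums); exact for '+' on ints
def pvAccumulate : List Int → Int → List Int
  | [], _ => []
  | x :: xs, s => (s + x) :: pvAccumulate xs (s + x)

-- counters[ord(c)] += 1 ; indexing is exact for ord(c) < 256, which Dom guarantees
def get_chars_counters (text : String) : List Int :=
  text.toList.foldl
    (fun counters c => counters.set c.toNat (counters.getD c.toNat 0 + 1))
    (List.replicate 256 0)

def get_chars_start_positions (counters : List Int) : List Int :=
  (pvAccumulate ((0 : Int) :: counters) 0).dropLast

-- [None]*len(text) is ported as a list of 0s: every slot is overwritten exactly once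
def compute_sorting_permutation (text : String) : List Int :=
  ((PySem.List.enumerate text.toList 0).foldl
    (fun (st : List Int × List Int) p =>
      (st.1.set p.2.toNat (st.1.getD p.2.toNat 0 + 1),
       st.2.set p.1.toNat (st.1.getD p.2.toNat 0)))
    (get_chars_start_positions (get_chars_counters text),
     List.replicate text.toList.length 0)).2

-- ===== PORT B =====
-- key=lambda i: text[i] returns a one-character string; it is ported as the character itself,
-- which has the same comparison order, so the sort is exact.
-- [None] * len(text) is ported as a list of 0s: every slot is overwritten exactly once.
def compute_sorting_permutation_alt (text : String) : List Int :=
  let order := PySem.List.sorted (PySem.List.pyRange 0 (text.toList.length : Int) 1)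
      (fun i => PySem.List.pyGetD text.toList i ' ') false
  (PySem.List.enumerate order 0).foldl
    (fun perm p => perm.set p.2.toNat p.1)
    (List.replicate text.toList.length 0)

-- ===== PRECONDITION & SPEC =====
def Spec_compute_sorting_permutation (text : String) (out : List Int) : Prop := out = compute_sorting_permutation_alt text
instance (text : String) (out : List Int) : Decidable (Spec_compute_sorting_permutation text out) := by unfold Spec_compute_sorting_permutation; infer_instance

-- ===== CLAIM (what is proved, stated in full; the proofs are below) =====
def Claim_equal_compute_sorting_permutation : Prop := ∀ (text : String), Dom_compute_sorting_permutation text → Spec_compute_sorting_permutation text (compute_sorting_permutation text)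

-- ===== LEMMAS AND PROOFS =====

theorem pv_char_lt (a b : Char) : (a < b) ↔ a.toNat < b.toNat :=
  ⟨fun h => UInt32.lt_iff_toNat_lt.mp h, fun h => UInt32.lt_iff_toNat_lt.mpr h⟩

theorem pv_char_eq (a b : Char) : a.toNat = b.toNat ↔ a = b :=
  ⟨fun h => Char.ext (UInt32.toNat_inj.mp h), fun h => by rw [h]⟩

-- A's result entry j, in closed form
def pvArank (l : List Char) (j : Nat) : Int :=
  (l.countP (fun d => decide (d.toNat < (l.getD j ' ').toNat)) : Int) +
  ((l.take j).countP (fun d => decide (d.toNat = (l.getD j ' ').toNat)) : Int)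

theorem pv_dom_chars (text : String) (h : Dom_compute_sorting_permutation text) :
    ∀ c ∈ text.toList, c.toNat < 256 := by
  intro c hc
  unfold Dom_compute_sorting_permutation pvDomStr at h
  rw [List.all_eq_true] at h
  have := h c hc
  unfold pvDomChar at this
  simp only [Bool.or_eq_true, Bool.and_eq_true, decide_eq_true_eq, beq_iff_eq] at this
  omega

-- counters fold: length preserved, entries count characters
theorem pv_counters_len (l : List Char) (cs : List Int) :
    (l.foldl (fun counters c => counters.set c.toNat (counters.getD c.toNat 0 + 1)) cs).length = cs.length := by
  induction l generalizing cs with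
  | nil => rfl
  | cons c l ih => rw [List.foldl_cons, ih, List.length_set]

theorem pv_counters_get (l : List Char) (cs : List Int)
    (hc : ∀ c ∈ l, c.toNat < cs.length) (v : Nat) :
    (l.foldl (fun counters c => counters.set c.toNat (counters.getD c.toNat 0 + 1)) cs).getD v 0
      = cs.getD v 0 + (l.countP (fun d => decide (d.toNat = v)) : Int) := by
  induction l generalizing cs with
  | nil => simp
  | cons c l ih =>
    have hclen : c.toNat < cs.length := hc c (List.mem_cons_self)
    have hlen : (cs.set c.toNat (cs.getD c.toNat 0 + 1)).length = cs.length := List.length_set ..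
    have hc' : ∀ d ∈ l, d.toNat < (cs.set c.toNat (cs.getD c.toNat 0 + 1)).length := by
      intro d hd; rw [hlen]; exact hc d (List.mem_cons_of_mem _ hd)
    rw [List.foldl_cons, ih _ hc']
    have hset : (cs.set c.toNat (cs.getD c.toNat 0 + 1)).getD v 0
        = if c.toNat = v then cs.getD v 0 + 1 else cs.getD v 0 := by
      by_cases hcv : c.toNat = v
      · subst hcv
        simp [List.getD_eq_getElem?_getD, hclen]
      · simp [List.getD_eq_getElem?_getD, hcv]
    rw [hset, List.countP_cons]
    by_cases hcv : c.toNat = v <;> simp [hcv] <;> push_cast <;> ring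

theorem pv_acc_len (cs : List Int) (s : Int) : (pvAccumulate cs s).length = cs.length := by
  induction cs generalizing s with
  | nil => rfl
  | cons x xs ih => simp [pvAccumulate, ih]

theorem pv_acc_get (cs : List Int) (s : Int) (v : Nat) (hv : v < cs.length) :
    (pvAccumulate cs s)[v]? = some (s + (cs.take (v + 1)).sum) := by
  induction cs generalizing s v with
  | nil => simp at hv
  | cons x xs ih =>
    cases v with
    | zero => simp [pvAccumulate]
    | succ u =>
      have hu : u < xs.length := by simpa using hv
      have := ih (s + x) u hu
      simp only [pvAccumulate, List.getElem?_cons_succ, this]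
      congr 1
      rw [List.take_succ_cons, List.sum_cons]
      ring

theorem pv_sp_len (cs : List Int) : (get_chars_start_positions cs).length = cs.length := by
  unfold get_chars_start_positions
  simp [List.length_dropLast, pv_acc_len]

theorem pv_sp_get (cs : List Int) (v : Nat) (hv : v < cs.length) :
    (get_chars_start_positions cs).getD v 0 = (cs.take v).sum := by
  have hlen : (get_chars_start_positions cs).length = cs.length := pv_sp_len cs
  have hv' : v < (get_chars_start_positions cs).length := by omega
  rw [List.getD_eq_getElem _ _ hv']
  unfold get_chars_start_positions
  rw [List.getElem_dropLast]
  cases v with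
  | zero => simp [pvAccumulate]
  | succ u =>
    have hu : u < cs.length := by omega
    have hg : ((0 : Int) :: pvAccumulate cs 0)[u + 1]? = some (0 + (cs.take (u + 1)).sum) := by
      simpa using pv_acc_get cs 0 u hu
    have hlt : u + 1 < ((0 : Int) :: pvAccumulate cs 0).length := by
      simp [pv_acc_len]; omega
    rw [List.getElem?_eq_getElem hlt] at hg
    simpa using hg

theorem pv_countP_lt_succ (l : List Char) (v : Nat) :
    l.countP (fun d => decide (d.toNat < v + 1))
      = l.countP (fun d => decide (d.toNat < v)) + l.countP (fun d => decide (d.toNat = v)) := by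
  induction l with
  | nil => rfl
  | cons c l ih =>
    simp only [List.countP_cons, ih]
    have h0 : (c.toNat < v + 1) = (c.toNat < v ∨ c.toNat = v) := by
      apply propext; constructor <;> omega
    by_cases h1 : c.toNat < v <;> by_cases h2 : c.toNat = v <;>
      simp [h0, h1, h2] <;> omega

-- prefix sums of the final counters = number of strictly smaller characters
theorem pv_sum_take_counters (text : String) (h : ∀ c ∈ text.toList, c.toNat < 256)
    (v : Nat) (hv : v ≤ 256) :
    ((get_chars_counters text).take v).sum
      = (text.toList.countP (fun d => decide (d.toNat < v)) : Int) := by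
  have hlen : (get_chars_counters text).length = 256 := by
    unfold get_chars_counters
    rw [pv_counters_len, List.length_replicate]
  induction v with
  | zero => simp
  | succ v ih =>
    have hv' : v < 256 := by omega
    have hvl : v < (get_chars_counters text).length := by omega
    rw [List.sum_take_succ _ _ hvl, ih (by omega)]
    have hrep : ∀ c ∈ text.toList, c.toNat < (List.replicate 256 (0 : Int)).length := by
      intro c hc; rw [List.length_replicate]; exact h c hc
    have hgv : (get_chars_counters text).getD v 0
        = (text.toList.countP (fun d => decide (d.toNat = v)) : Int) := by
      unfold get_chars_counters
      rw [pv_counters_get _ _ hrep, List.getD_eq_getElem?_getD, List.getElem?_replicate]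
      split <;> simp
    rw [← List.getD_eq_getElem _ 0 hvl, hgv, pv_countP_lt_succ]
    push_cast
    ring

-- the scatter loop, characterised entry-wise
theorem pv_scatter_get (l : List Char) (hl : ∀ c ∈ l, c.toNat < 256) :
    ∀ (rest : List Char) (k : Nat) (st out : List Int),
      st.length = 256 → out.length = l.length → l.take k ++ rest = l →
      (∀ v, v < 256 → st.getD v 0
          = (l.countP (fun d => decide (d.toNat < v)) : Int)
            + ((l.take k).countP (fun d => decide (d.toNat = v)) : Int)) →
      ∀ j : Nat,
        (((PySem.List.enumerate rest (k : Int)).foldl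
          (fun (st : List Int × List Int) p =>
            (st.1.set p.2.toNat (st.1.getD p.2.toNat 0 + 1),
             st.2.set p.1.toNat (st.1.getD p.2.toNat 0)))
          (st, out)).2)[j]?
        = if k ≤ j ∧ j < k + rest.length then some (pvArank l j) else out[j]? := by
  intro rest
  induction rest with
  | nil =>
    intro k st out hst hout htake hinv j
    rw [PySem.List.enumerate_nil, List.foldl_nil, if_neg (by simp only [List.length_nil]; omega)]
  | cons c rest ih =>
    intro k st out hst hout htake hinv j
    have hlenl := congrArg List.length htake
    simp only [List.length_append, List.length_take, List.length_cons] at hlenl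
    have hk : k < l.length := by omega
    have hlen_take : (l.take k).length = k := by rw [List.length_take]; omega
    have hlk : l[k]? = some c := by
      conv_lhs => rw [← htake]
      rw [List.getElem?_append_right (by omega), hlen_take, Nat.sub_self,
        List.getElem?_cons_zero]
    have hcmem : c ∈ l := by
      rw [← htake]; exact List.mem_append_right _ List.mem_cons_self
    have hc256 : c.toNat < 256 := hl c hcmem
    obtain ⟨hk', hgetk⟩ := List.getElem?_eq_some_iff.mp hlk
    have hgetD : l.getD k ' ' = c := by
      rw [List.getD_eq_getElem _ _ hk]; exact hgetk
    have hval : st.getD c.toNat 0 = pvArank l k := by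
      rw [hinv c.toNat hc256]
      unfold pvArank
      rw [hgetD]
    have htake1 : l.take (k + 1) = l.take k ++ [c] := by
      rw [List.take_add_one, hlk]; rfl
    have htake' : l.take (k + 1) ++ rest = l := by
      rw [htake1, List.append_assoc, List.singleton_append, htake]
    have hcast : (k : Int) + 1 = ((k + 1 : Nat) : Int) := by push_cast; ring
    rw [PySem.List.enumerate_cons, List.foldl_cons, hcast]
    have hst' : (st.set c.toNat (st.getD c.toNat 0 + 1)).length = 256 := by
      rw [List.length_set]; exact hst
    have hout' : (out.set (k : Int).toNat (st.getD c.toNat 0)).length = l.length := by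
      rw [List.length_set]; exact hout
    have hinv' : ∀ v, v < 256 →
        (st.set c.toNat (st.getD c.toNat 0 + 1)).getD v 0
          = (l.countP (fun d => decide (d.toNat < v)) : Int)
            + ((l.take (k + 1)).countP (fun d => decide (d.toNat = v)) : Int) := by
      intro v hv
      rw [htake1, List.countP_append]
      by_cases hcv : c.toNat = v
      · subst hcv
        rw [List.getD_eq_getElem?_getD, List.getElem?_set, if_pos rfl, if_pos (by omega)]
        simp only [Option.getD_some]
        rw [hinv c.toNat hc256]
        have h1 : List.countP (fun d => decide (d.toNat = c.toNat)) [c] = 1 := by simp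
        rw [h1]
        push_cast
        ring
      · rw [List.getD_eq_getElem?_getD, List.getElem?_set, if_neg hcv,
          ← List.getD_eq_getElem?_getD, hinv v hv]
        have : List.countP (fun d => decide (d.toNat = v)) [c] = 0 := by
          simp [hcv]
        rw [this]
        push_cast
        ring
    have hmain := ih (k + 1) (st.set c.toNat (st.getD c.toNat 0 + 1))
      (out.set (k : Int).toNat (st.getD c.toNat 0)) hst' hout' htake' hinv' j
    simp only [Int.toNat_natCast] at hmain ⊢
    rw [hmain]
    by_cases hjk : j = k
    · subst hjk
      rw [if_neg (by omega), if_pos (by simp only [List.length_cons]; omega)]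
      rw [List.getElem?_set, if_pos rfl, if_pos (by omega), hval]
    · by_cases hjr : k + 1 ≤ j ∧ j < k + 1 + rest.length
      · rw [if_pos hjr, if_pos (by simp only [List.length_cons]; omega)]
      · rw [if_neg hjr, if_neg (by simp only [List.length_cons]; omega), List.getElem?_set, if_neg (by omega)]

theorem pv_A_get (text : String) (h : Dom_compute_sorting_permutation text) (j : Nat) :
    (compute_sorting_permutation text)[j]?
      = if j < text.toList.length then some (pvArank text.toList j) else none := by
  have hchars := pv_dom_chars text h
  have hclen : (get_chars_counters text).length = 256 := by
    unfold get_chars_counters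
    rw [pv_counters_len, List.length_replicate]
  have hst : (get_chars_start_positions (get_chars_counters text)).length = 256 := by
    rw [pv_sp_len, hclen]
  have hinv0 : ∀ v, v < 256 →
      (get_chars_start_positions (get_chars_counters text)).getD v 0
        = (text.toList.countP (fun d => decide (d.toNat < v)) : Int)
          + ((text.toList.take 0).countP (fun d => decide (d.toNat = v)) : Int) := by
    intro v hv
    rw [pv_sp_get _ _ (by omega), pv_sum_take_counters text hchars v (by omega)]
    simp
  have hmain := pv_scatter_get text.toList hchars text.toList 0
    (get_chars_start_positions (get_chars_counters text))
    (List.replicate text.toList.length 0) hst (List.length_replicate ..)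
    (by simp) hinv0 j
  simp only [Nat.cast_zero] at hmain
  unfold compute_sorting_permutation
  rw [hmain]
  by_cases hj : j < text.toList.length
  · rw [if_pos (by omega), if_pos hj]
  · rw [if_neg (by omega), if_neg hj, List.getElem?_replicate, if_neg (by omega)]

theorem pv_insertBy_congr {α : Type} (b1 b2 : α → α → Bool) (x : α) (acc : List α)
    (h : ∀ y ∈ acc, b1 x y = b2 x y) :
    PySem.List.insertBy b1 x acc = PySem.List.insertBy b2 x acc := by
  induction acc with
  | nil => rfl
  | cons y ys ih =>
    simp only [PySem.List.insertBy]
    rw [h y List.mem_cons_self]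
    split
    · rfl
    · rw [ih (fun z hz => h z (List.mem_cons_of_mem _ hz))]

-- stability: on a strictly increasing list, sorting by key equals sorting by (key, element) lex
theorem pv_sorted_key_eq_lex (key : Int → Char) (xs : List Int) (h : xs.Pairwise (· < ·)) :
    PySem.List.sorted xs key false
      = PySem.List.sorted xs (fun i => toLex (key i, i)) false := by
  induction xs using List.reverseRecOn with
  | nil => rfl
  | append_singleton ys x ih =>
    obtain ⟨hys, -, hlt⟩ := List.pairwise_append.mp h
    rw [PySem.List.sorted_eq_foldl_insertBy, PySem.List.sorted_eq_foldl_insertBy,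
      List.foldl_append, List.foldl_append,
      ← PySem.List.sorted_eq_foldl_insertBy, ← PySem.List.sorted_eq_foldl_insertBy,
      ih hys]
    simp only [List.foldl_cons, List.foldl_nil]
    apply pv_insertBy_congr
    intro y hy
    have hyx : y < x := hlt y ((PySem.List.mem_sorted ys _ false y).mp hy) x List.mem_cons_self
    have : (toLex (key x, x) < toLex (key y, y)) ↔ key x < key y := by
      rw [Prod.Lex.lt_iff]
      constructor
      · rintro (hk | ⟨-, hxy⟩)
        · exact hk
        · simp only [ofLex_toLex] at hxy
          omega
      · exact Or.inl
    rw [decide_eq_decide]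
    exact this.symm

-- position of an element in a strictly key-increasing list = number of elements with smaller key
theorem pv_idxOf_sorted {κ : Type} [LinearOrder κ] (f : Int → κ) (o : List Int) (v : Int)
    (ho : o.Pairwise (fun a b => f a < f b)) (hv : v ∈ o) :
    o.idxOf v = o.countP (fun i => decide (f i < f v)) := by
  induction o with
  | nil => simp at hv
  | cons a o ih =>
    obtain ⟨ha, ho'⟩ := List.pairwise_cons.mp ho
    by_cases hav : a = v
    · subst hav
      rw [List.idxOf_cons_self, List.countP_cons]
      have h0 : List.countP (fun i => decide (f i < f a)) o = 0 := by
        rw [List.countP_eq_zero]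
        intro i hi
        simp only [decide_eq_true_eq]
        exact not_lt_of_gt (ha i hi)
      rw [h0]
      simp
    · have hvo : v ∈ o := by
        rcases List.mem_cons.mp hv with h | h
        · exact absurd h.symm hav
        · exact h
      rw [List.idxOf_cons_ne _ hav, List.countP_cons, ih ho' hvo]
      have : f a < f v := ha v hvo
      simp [this]

-- the inversion loop perm[idx] = rank, characterised entry-wise
theorem pv_invert_get :
    ∀ (o : List Int) (r : Nat) (out : List Int), o.Nodup →
      (∀ x ∈ o, 0 ≤ x ∧ x.toNat < out.length) →
      ∀ j : Nat,
        ((PySem.List.enumerate o (r : Int)).foldl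
          (fun perm p => perm.set p.2.toNat p.1) out)[j]?
        = if (j : Int) ∈ o then some ((r : Int) + (o.idxOf (j : Int) : Int)) else out[j]? := by
  intro o
  induction o with
  | nil =>
    intro r out _ _ j
    rw [PySem.List.enumerate_nil, List.foldl_nil, if_neg (List.not_mem_nil)]
  | cons idx o ih =>
    intro r out hnd hb j
    obtain ⟨hidx0, hidxlen⟩ := hb idx List.mem_cons_self
    obtain ⟨hnmem, hnd'⟩ := List.nodup_cons.mp hnd
    have hb' : ∀ x ∈ o, 0 ≤ x ∧ x.toNat < (out.set idx.toNat (r : Int)).length := by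
      intro x hx
      rw [List.length_set]
      exact hb x (List.mem_cons_of_mem _ hx)
    have hcast : (r : Int) + 1 = ((r + 1 : Nat) : Int) := by push_cast; ring
    rw [PySem.List.enumerate_cons, List.foldl_cons, hcast,
      ih (r + 1) (out.set idx.toNat (r : Int)) hnd' hb' j]
    by_cases hji : (j : Int) = idx
    · have hjn : idx.toNat = j := by omega
      rw [if_neg (by rw [← hji] at hnmem; exact hnmem),
        if_pos (by rw [hji]; exact List.mem_cons_self)]
      rw [List.getElem?_set, if_pos hjn, if_pos (by omega), ← hji, List.idxOf_cons_self]
      simp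
    · by_cases hjo : (j : Int) ∈ o
      · rw [if_pos hjo, if_pos (List.mem_cons_of_mem _ hjo),
          List.idxOf_cons_ne _ (fun h => hji h.symm)]
        congr 1
        push_cast [Nat.succ_eq_add_one]
        ring
      · rw [if_neg hjo, if_neg (by simp [hji, hjo]),
          List.getElem?_set, if_neg (by omega)]

-- the index range, mapped through the text, is the text (prefix)
theorem pv_map_pyRange_take (l : List Char) (m : Nat) (hm : m ≤ l.length) :
    (PySem.List.pyRange 0 (m : Int) 1).map (fun i => PySem.List.pyGetD l i ' ')
      = l.take m := by
  apply List.ext_getElem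
  · rw [List.length_map, PySem.List.length_pyRange_one, List.length_take]
    omega
  · intro k h1 h2
    rw [List.getElem_map, PySem.List.getElem_pyRange_one]
    have hk : k < m := by
      have := h2
      rw [List.length_take] at this
      omega
    have : (0 : Int) + (k : Int) = ((k : Nat) : Int) := by ring
    rw [this, PySem.List.pyGetD_natCast, List.getElem_take,
      List.getD_eq_getElem _ _ (by omega)]

theorem pv_countP_or_disjoint {α : Type} (p q : α → Prop) [DecidablePred p] [DecidablePred q]
    (l : List α) (h : ∀ x ∈ l, ¬(p x ∧ q x)) :
    l.countP (fun x => decide (p x ∨ q x))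
      = l.countP (fun x => decide (p x)) + l.countP (fun x => decide (q x)) := by
  induction l with
  | nil => rfl
  | cons a l ih =>
    simp only [List.countP_cons, ih (fun x hx => h x (List.mem_cons_of_mem _ hx))]
    have hna := h a List.mem_cons_self
    by_cases hp : p a <;> by_cases hq : q a
    · exact absurd ⟨hp, hq⟩ hna
    · simp [hp, hq]
      omega
    · simp [hp, hq]
      omega
    · simp [hp, hq]

theorem pv_lexkey_inj (l : List Char) (a b : Int)
    (h : (toLex (PySem.List.pyGetD l a ' ', a) : Lex (Char × Int))
       = toLex (PySem.List.pyGetD l b ' ', b)) : a = b := by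
  have := congrArg (fun x : Lex (Char × Int) => (ofLex x).2) h
  simpa using this

theorem pv_B_get (text : String) (j : Nat) :
    (compute_sorting_permutation_alt text)[j]?
      = if h : j < text.toList.length then
          some ((text.toList.countP (fun d => decide (d < text.toList[j])) : Int)
                + ((text.toList.take j).countP (fun d => decide (d = text.toList[j])) : Int))
        else none := by
  unfold compute_sorting_permutation_alt
  have hpw : (PySem.List.pyRange 0 (text.toList.length : Int) 1).Pairwise (· < ·) :=
    PySem.List.pairwise_lt_pyRange_one 0 _
  rw [pv_sorted_key_eq_lex (fun i => PySem.List.pyGetD text.toList i ' ') _ hpw]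
  set lexkey : Int → Lex (Char × Int) :=
    fun i => toLex (PySem.List.pyGetD text.toList i ' ', i) with hlexkey
  set o := PySem.List.sorted (PySem.List.pyRange 0 (text.toList.length : Int) 1) lexkey false
    with ho
  have hperm : o.Perm (PySem.List.pyRange 0 (text.toList.length : Int) 1) :=
    PySem.List.sorted_perm (PySem.List.pyRange 0 (text.toList.length : Int) 1) lexkey false
  have hmem : ∀ x : Int, x ∈ o ↔ 0 ≤ x ∧ x < (text.toList.length : Int) := by
    intro x
    rw [ho, PySem.List.mem_sorted, PySem.List.mem_pyRange_one]
  have hnd : o.Nodup := hperm.nodup_iff.mpr (PySem.List.nodup_pyRange_one 0 _)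
  have hbd : ∀ x ∈ o, 0 ≤ x ∧ x.toNat < (List.replicate text.toList.length (0 : Int)).length := by
    intro x hx
    have := (hmem x).mp hx
    rw [List.length_replicate]
    omega
  have hle : o.Pairwise (fun a b => lexkey a ≤ lexkey b) := by
    have := PySem.List.sorted_pairwise
      (PySem.List.pyRange 0 (text.toList.length : Int) 1) lexkey
    rwa [← ho] at this
  have hsorted : o.Pairwise (fun a b => lexkey a < lexkey b) := by
    have hne : o.Pairwise (fun a b : Int => a ≠ b) := hnd
    exact (hle.and hne).imp (fun {a b} hab =>
      lt_of_le_of_ne hab.1 (fun he => hab.2 (pv_lexkey_inj text.toList a b he)))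
  have hinv := pv_invert_get o 0 (List.replicate text.toList.length 0) hnd hbd j
  simp only [Nat.cast_zero] at hinv
  rw [hinv]
  by_cases hj : j < text.toList.length
  · have hjo : (j : Int) ∈ o := (hmem _).mpr (by constructor <;> [positivity; exact_mod_cast hj])
    rw [dif_pos hj, if_pos hjo, pv_idxOf_sorted lexkey o _ hsorted hjo, hperm.countP_eq]
    have hc : PySem.List.pyGetD text.toList ((j : Nat) : Int) ' ' = text.toList[j] := by
      rw [PySem.List.pyGetD_natCast, List.getD_eq_getElem _ _ hj]
    have hpred : ∀ i : Int, (lexkey i < lexkey (j : Int))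
        ↔ (PySem.List.pyGetD text.toList i ' ' < text.toList[j]
           ∨ (PySem.List.pyGetD text.toList i ' ' = text.toList[j] ∧ i < (j : Int))) := by
      intro i
      rw [hlexkey]
      rw [Prod.Lex.lt_iff]
      simp [hc]
    have hcongr : List.countP (fun i => decide (lexkey i < lexkey (j : Int)))
          (PySem.List.pyRange 0 (text.toList.length : Int) 1)
        = List.countP (fun i => decide (PySem.List.pyGetD text.toList i ' ' < text.toList[j]
            ∨ (PySem.List.pyGetD text.toList i ' ' = text.toList[j] ∧ i < (j : Int))))
          (PySem.List.pyRange 0 (text.toList.length : Int) 1) :=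
      List.countP_congr (fun i _ => by
        simp only [decide_eq_true_eq]
        exact hpred i)
    rw [hcongr, pv_countP_or_disjoint _ _ _ (fun i _ hpq => absurd hpq.1 (by rw [hpq.2.1]; exact lt_irrefl _))]
    have h1 : List.countP (fun i => decide (PySem.List.pyGetD text.toList i ' ' < text.toList[j]))
          (PySem.List.pyRange 0 (text.toList.length : Int) 1)
        = List.countP (fun d => decide (d < text.toList[j])) text.toList := by
      have hmapfull : (PySem.List.pyRange 0 (text.toList.length : Int) 1).map
          (fun i => PySem.List.pyGetD text.toList i ' ') = text.toList := by
        rw [pv_map_pyRange_take text.toList text.toList.length (le_refl _), List.take_length]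
      calc List.countP (fun i => decide (PySem.List.pyGetD text.toList i ' ' < text.toList[j]))
            (PySem.List.pyRange 0 (text.toList.length : Int) 1)
          = List.countP (fun d => decide (d < text.toList[j]))
              ((PySem.List.pyRange 0 (text.toList.length : Int) 1).map
                (fun i => PySem.List.pyGetD text.toList i ' ')) := by
            rw [List.countP_map]
            rfl
        _ = List.countP (fun d => decide (d < text.toList[j])) text.toList := by rw [hmapfull]
    have hsplit : PySem.List.pyRange 0 (text.toList.length : Int) 1
        = PySem.List.pyRange 0 ((j : Nat) : Int) 1
          ++ PySem.List.pyRange ((j : Nat) : Int) (text.toList.length : Int) 1 :=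
      PySem.List.pyRange_one_append 0 _ _ (by positivity) (by exact_mod_cast le_of_lt hj)
    have h2 : List.countP (fun i => decide (PySem.List.pyGetD text.toList i ' ' = text.toList[j]
            ∧ i < (j : Int))) (PySem.List.pyRange 0 (text.toList.length : Int) 1)
        = List.countP (fun d => decide (d = text.toList[j])) (text.toList.take j) := by
      rw [hsplit, List.countP_append]
      have hz : List.countP (fun i => decide (PySem.List.pyGetD text.toList i ' ' = text.toList[j]
            ∧ i < (j : Int))) (PySem.List.pyRange ((j : Nat) : Int) (text.toList.length : Int) 1) = 0 := by
        rw [List.countP_eq_zero]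
        intro i hi
        have := (PySem.List.mem_pyRange_one).mp hi
        simp only [decide_eq_true_eq]
        intro hpq
        omega
      have hfirst : List.countP (fun i => decide (PySem.List.pyGetD text.toList i ' ' = text.toList[j]
            ∧ i < (j : Int))) (PySem.List.pyRange 0 ((j : Nat) : Int) 1)
          = List.countP (fun i => decide (PySem.List.pyGetD text.toList i ' ' = text.toList[j]))
            (PySem.List.pyRange 0 ((j : Nat) : Int) 1) := by
        apply List.countP_congr
        intro i hi
        have := (PySem.List.mem_pyRange_one).mp hi
        simp only [decide_eq_true_eq]
        constructor
        · exact fun h => h.1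
        · exact fun h => ⟨h, this.2⟩
      rw [hfirst, hz]
      have : List.countP (fun d => decide (d = text.toList[j])) (text.toList.take j)
          = List.countP (fun i => decide (PySem.List.pyGetD text.toList i ' ' = text.toList[j]))
            (PySem.List.pyRange 0 ((j : Nat) : Int) 1) := by
        rw [← pv_map_pyRange_take text.toList j (le_of_lt hj), List.countP_map]
        rfl
      rw [this]
      omega
    rw [h1, h2]
    congr 1
    push_cast
    ring
  · have hjo : (j : Int) ∉ o := by
      intro h
      have := (hmem _).mp h
      omega
    rw [dif_neg hj, if_neg hjo, List.getElem?_replicate, if_neg (by omega)]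
-- ===== VERDICT (by name: the statement is the Claim_ definition above) =====
theorem compute_sorting_permutation_spec : Claim_equal_compute_sorting_permutation := by
  intro text hdom
  unfold Spec_compute_sorting_permutation
  apply List.ext_getElem?
  intro j
  rw [pv_A_get text hdom j, pv_B_get text j]
  by_cases hj : j < text.toList.length
  · rw [if_pos hj, dif_pos hj]
    have hget : text.toList.getD j ' ' = text.toList[j] := List.getD_eq_getElem _ _ hj
    unfold pvArank
    rw [hget]
    have h1 : List.countP (fun d => decide (d.toNat < text.toList[j].toNat)) text.toList
        = List.countP (fun d => decide (d < text.toList[j])) text.toList :=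
      List.countP_congr (fun d _ => by
        simpa using (pv_char_lt d _).symm)
    have h2 : List.countP (fun d => decide (d.toNat = text.toList[j].toNat)) (List.take j text.toList)
        = List.countP (fun d => decide (d = text.toList[j])) (List.take j text.toList) :=
      List.countP_congr (fun d _ => by
        simpa using pv_char_eq d _)
    rw [h1, h2]
  · rw [if_neg hj, dif_neg hj]
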